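-- pv_equiv track=rewrite | github.com/Rahulrxa/python-alfy-bootcamp | Week 2/Day 02/lists_functions_exercise.py | check_monotonic_sequence
-- ===== SOURCE A (Python) =====
-- def monotonicity_by_operator(operator, sequence):
--     monolist = []
--     for i in range(len(sequence) - 1):
--         # use Dictionaries
--         match operator:
--             case '<=':
--                 if sequence[i] <= sequence[i + 1]:
--                     monolist.append(True)
--                 else:
--                     monolist.append(False)
--             case '<':
--                 if sequence[i] < sequence[i + 1]:
--                     monolist.append(True)
--                 else:
--                     monolist.append(False)
--             case '>=':
--                 if sequence[i] >= sequence[i + 1]: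
--                     monolist.append(True)
--                 else:
--                     monolist.append(False)
--             case '>':
--                 if sequence[i] > sequence[i + 1]:
--                     monolist.append(True)
--                 else:
--                     monolist.append(False)
--     return False not in monolist
--
-- def check_monotonic_sequence(sequence):
--     operators = ['<=', '<', '>=', '>']
--     lst = []
--     if len(sequence) < 2:
--         return [True, True, True, True]
--     for operator in operators:
--         lst.append(monotonicity_by_operator(operator, sequence))
--     return lst
-- ===== SOURCE B (Python) =====
-- def check_monotonic_sequence(sequence):
--     le = lt = ge = gt = True
--     for i in range(len(sequence) - 1):
--         a, b = sequence[i], sequence[i + 1]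
--         le = le and a <= b
--         lt = lt and a < b
--         ge = ge and a >= b
--         gt = gt and a > b
--     return [le, lt, ge, gt]
-- ===== Notes on version B (the rewrite author's own statement) =====
-- stated objective: faster
-- what changed: One fused pass over adjacent pairs maintaining four boolean accumulators, instead of four separate passes each building an intermediate list of booleans and testing 'False not in' membership.
import Mathlib
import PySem

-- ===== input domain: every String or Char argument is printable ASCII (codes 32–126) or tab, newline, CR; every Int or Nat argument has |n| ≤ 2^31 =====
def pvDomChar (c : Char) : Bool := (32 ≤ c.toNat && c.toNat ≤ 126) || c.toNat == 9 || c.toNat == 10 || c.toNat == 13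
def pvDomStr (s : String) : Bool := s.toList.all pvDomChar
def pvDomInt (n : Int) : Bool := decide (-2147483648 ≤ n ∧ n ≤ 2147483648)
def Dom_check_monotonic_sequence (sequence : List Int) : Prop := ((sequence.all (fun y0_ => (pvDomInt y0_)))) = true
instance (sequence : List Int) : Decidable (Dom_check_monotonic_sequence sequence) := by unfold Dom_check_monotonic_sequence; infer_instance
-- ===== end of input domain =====

-- B replaces A's four separate passes (each building a list of booleans and testing membership)
-- with one fused pass keeping four boolean accumulators; same return value everywhere.

-- ===== PORT A =====
-- helper: monotonicity_by_operator(operator, sequence)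
def monotonicity_by_operator (operator : String) (sequence : List Int) : Bool :=
  let monolist : List Bool :=
    (PySem.List.pyRange 0 ((sequence.length : Int) - 1) 1).foldl
      (fun monolist i =>
        match operator with
        | "<=" => if PySem.List.pyGetD sequence i 0 ≤ PySem.List.pyGetD sequence (i + 1) 0 then
                    monolist ++ [true] else monolist ++ [false]
        | "<"  => if PySem.List.pyGetD sequence i 0 < PySem.List.pyGetD sequence (i + 1) 0 then
                    monolist ++ [true] else monolist ++ [false]
        | ">=" => if PySem.List.pyGetD sequence i 0 ≥ PySem.List.pyGetD sequence (i + 1) 0 then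
                    monolist ++ [true] else monolist ++ [false]
        | ">"  => if PySem.List.pyGetD sequence i 0 > PySem.List.pyGetD sequence (i + 1) 0 then
                    monolist ++ [true] else monolist ++ [false]
        | _ => monolist) []
  -- 'False not in monolist'
  !(monolist.contains false)

def check_monotonic_sequence (sequence : List Int) : List Bool :=
  let operators := ["<=", "<", ">=", ">"]
  if sequence.length < 2 then [true, true, true, true]
  else operators.foldl (fun lst op => lst ++ [monotonicity_by_operator op sequence]) []

-- ===== PORT B =====
def check_monotonic_sequence_alt (sequence : List Int) : List Bool :=
  let st :=
    (PySem.List.pyRange 0 ((sequence.length : Int) - 1) 1).foldl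
      (fun (st : Bool × Bool × Bool × Bool) i =>
        let a := PySem.List.pyGetD sequence i 0
        let b := PySem.List.pyGetD sequence (i + 1) 0
        (st.1 && decide (a ≤ b), st.2.1 && decide (a < b),
         st.2.2.1 && decide (a ≥ b), st.2.2.2 && decide (a > b)))
      (true, true, true, true)
  [st.1, st.2.1, st.2.2.1, st.2.2.2]

-- ===== PRECONDITION & SPEC =====
def Spec_check_monotonic_sequence (sequence : List Int) (out : List Bool) : Prop := out = check_monotonic_sequence_alt sequence
instance (sequence : List Int) (out : List Bool) : Decidable (Spec_check_monotonic_sequence sequence out) := by unfold Spec_check_monotonic_sequence; infer_instance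

-- ===== CLAIM (what is proved, stated in full; the proofs are below) =====
def Claim_equal_check_monotonic_sequence : Prop := ∀ (sequence : List Int), Dom_check_monotonic_sequence sequence → Spec_check_monotonic_sequence sequence (check_monotonic_sequence sequence)

-- ===== LEMMAS AND PROOFS =====

-- A's per-operator loop: appending (if f i then [true] else [false]) along L yields acc ++ L.map f
theorem pv_foldl_append_ite (p : Int → Prop) [DecidablePred p] (L : List Int) (acc : List Bool) :
    L.foldl (fun m i => if p i then m ++ [true] else m ++ [false]) acc
      = acc ++ L.map (fun i => decide (p i)) := by
  induction L generalizing acc with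
  | nil => simp
  | cons x xs ih =>
    simp only [List.foldl_cons, List.map_cons]
    by_cases h : p x <;> simp [h, ih]

theorem pv_not_contains_false (L : List Int) (f : Int → Bool) :
    (!((L.map f).contains false)) = L.all f := by
  induction L with
  | nil => rfl
  | cons x xs ih => cases h : f x <;> simp_all

-- B's fused loop splits into four independent 'all's
theorem pv_fused (f1 f2 f3 f4 : Int → Bool) (L : List Int) (a b c d : Bool) :
    L.foldl (fun (st : Bool × Bool × Bool × Bool) i =>
        (st.1 && f1 i, st.2.1 && f2 i, st.2.2.1 && f3 i, st.2.2.2 && f4 i)) (a, b, c, d)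
      = (a && L.all f1, b && L.all f2, c && L.all f3, d && L.all f4) := by
  induction L generalizing a b c d with
  | nil => simp
  | cons x xs ih => simp [ih, Bool.and_assoc]

-- ===== VERDICT (by name: the statement is the Claim_ definition above) =====
theorem check_monotonic_sequence_spec : Claim_equal_check_monotonic_sequence := by
  intro sequence _
  unfold Spec_check_monotonic_sequence check_monotonic_sequence check_monotonic_sequence_alt
  simp only []
  rw [pv_fused]
  by_cases h2 : sequence.length < 2
  · have : PySem.List.pyRange 0 ((sequence.length : Int) - 1) 1 = [] :=
      PySem.List.pyRange_one_eq_nil (by omega)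
    simp [h2, this]
  · simp only [h2, if_false, List.foldl]
    unfold monotonicity_by_operator
    simp only []
    rw [pv_foldl_append_ite, pv_foldl_append_ite, pv_foldl_append_ite, pv_foldl_append_ite]
    simp only [List.nil_append]
    rw [pv_not_contains_false, pv_not_contains_false, pv_not_contains_false, pv_not_contains_false]
    simp
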